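-- pv_equiv track=rewrite | github.com/autosome-ru/BABACHI | src/babachi/bad_estimation.py | split_into_overlapping_regions
-- ===== SOURCE A (Python) =====
-- def split_into_overlapping_regions(total_length, length_of_region, overlap):
--     result = []
--     if total_length <= length_of_region:
--         result.append((0, total_length - 1))
--         return result
--     total_length -= overlap
--     div, _ = divmod(total_length - 1, length_of_region - overlap)
--     new_l, num = divmod(total_length - 1, div)
--     # --- ----- ------ ----- never mind, just my colleague code ---- -------
--     for i in range(div):
--         if i < num:
--             result.append(((new_l + 1) * i, (new_l + 1) * (i + 1) + overlap))
--         else: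
--             result.append((new_l * i + num, new_l * (i + 1) + overlap + num))
--     return result
-- ===== SOURCE B (Python) =====
-- def split_into_overlapping_regions(total_length, length_of_region, overlap):
--     if total_length <= length_of_region:
--         return [(0, total_length - 1)]
--     span = total_length - overlap
--     div = (span - 1) // (length_of_region - overlap)
--     new_l, num = divmod(span - 1, div)
--     # build the list of chunk lengths, then emit regions with a running start
--     lengths = [new_l + 1] * num + [new_l] * (div - num)
--     result = []
--     pos = 0
--     for length in lengths:
--         result.append((pos, pos + length + overlap))
--         pos += length
--     return result
-- ===== Notes on version B (the rewrite author's own statement) =====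
-- stated objective: alternative
-- what changed: B first materialises the list of chunk lengths ([new_l+1]*num + [new_l]*(div-num)) and then emits regions with a single running-start accumulator (pos, pos+length+overlap), replacing A's per-index closed-form multiplication with its i<num branch inside the loop.
import Mathlib
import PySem

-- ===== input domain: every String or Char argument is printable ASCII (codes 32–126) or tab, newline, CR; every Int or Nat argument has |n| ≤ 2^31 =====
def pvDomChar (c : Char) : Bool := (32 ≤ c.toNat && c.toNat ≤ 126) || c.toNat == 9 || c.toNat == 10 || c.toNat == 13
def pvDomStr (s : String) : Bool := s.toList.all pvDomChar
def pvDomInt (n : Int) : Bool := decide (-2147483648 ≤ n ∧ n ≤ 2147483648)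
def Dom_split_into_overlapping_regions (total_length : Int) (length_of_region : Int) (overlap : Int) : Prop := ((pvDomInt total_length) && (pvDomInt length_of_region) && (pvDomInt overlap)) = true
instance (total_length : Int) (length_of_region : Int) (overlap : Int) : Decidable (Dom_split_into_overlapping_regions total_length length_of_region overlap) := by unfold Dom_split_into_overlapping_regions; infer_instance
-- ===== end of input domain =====

-- B builds the list of chunk lengths first and emits regions with a running start
-- accumulator instead of A's closed-form per-index multiplication (objective: alternative).

-- ===== PORT A =====
def split_into_overlapping_regions (total_length : Int) (length_of_region : Int) (overlap : Int) : List (Int × Int) :=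
  if total_length ≤ length_of_region then [(0, total_length - 1)]
  else
    let tl := total_length - overlap
    let div := PySem.Int.floordiv (tl - 1) (length_of_region - overlap)
    let new_l := PySem.Int.floordiv (tl - 1) div
    let num := PySem.Int.mod (tl - 1) div
    (PySem.List.pyRange 0 div 1).foldl (fun result i =>
      if i < num then result ++ [((new_l + 1) * i, (new_l + 1) * (i + 1) + overlap)]
      else result ++ [(new_l * i + num, new_l * (i + 1) + overlap + num)]) []

-- ===== PORT B =====
def split_into_overlapping_regions_alt (total_length : Int) (length_of_region : Int) (overlap : Int) : List (Int × Int) :=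
  if total_length ≤ length_of_region then [(0, total_length - 1)]
  else
    let span := total_length - overlap
    let div := PySem.Int.floordiv (span - 1) (length_of_region - overlap)
    let new_l := PySem.Int.floordiv (span - 1) div
    let num := PySem.Int.mod (span - 1) div
    -- Python's `[x] * n` is [] for n ≤ 0, exactly `List.replicate n.toNat x`
    let lengths := List.replicate num.toNat (new_l + 1) ++ List.replicate (div - num).toNat new_l
    (lengths.foldl (fun acc length => (acc.1 ++ [(acc.2, acc.2 + length + overlap)], acc.2 + length))
      (([] : List (Int × Int)), (0 : Int))).1

-- ===== PRECONDITION & SPEC =====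
-- Pre_ excludes exactly the inputs where Python A raises ZeroDivisionError:
-- length_of_region = overlap (first divmod), or div = 0 (second divmod).
def Pre_split_into_overlapping_regions (total_length : Int) (length_of_region : Int) (overlap : Int) : Prop :=
  (total_length ≤ length_of_region
    || (!(length_of_region - overlap == 0)
        && !(PySem.Int.floordiv (total_length - overlap - 1) (length_of_region - overlap) == 0))) = true
instance (total_length : Int) (length_of_region : Int) (overlap : Int) : Decidable (Pre_split_into_overlapping_regions total_length length_of_region overlap) := by unfold Pre_split_into_overlapping_regions; infer_instance

def pvWitness_split_into_overlapping_regions : Int × Int × Int := (25, 10, 2)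

def Spec_split_into_overlapping_regions (total_length : Int) (length_of_region : Int) (overlap : Int) (out : List (Int × Int)) : Prop := out = split_into_overlapping_regions_alt total_length length_of_region overlap
instance (total_length : Int) (length_of_region : Int) (overlap : Int) (out : List (Int × Int)) : Decidable (Spec_split_into_overlapping_regions total_length length_of_region overlap out) := by unfold Spec_split_into_overlapping_regions; infer_instance

-- ===== CLAIM (what is proved, stated in full; the proofs are below) =====
def Claim_equal_split_into_overlapping_regions : Prop := ∀ (total_length : Int) (length_of_region : Int) (overlap : Int), Dom_split_into_overlapping_regions total_length length_of_region overlap → Pre_split_into_overlapping_regions total_length length_of_region overlap → Spec_split_into_overlapping_regions total_length length_of_region overlap (split_into_overlapping_regions total_length length_of_region overlap)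

-- ===== LEMMAS AND PROOFS =====

-- the region list B's running-start loop produces from a list of chunk lengths
def pvEmit (ov : Int) : List Int → Int → List (Int × Int)
  | [], _ => []
  | x :: xs, p => (p, p + x + ov) :: pvEmit ov xs (p + x)

theorem pvFoldB (ov : Int) (l : List Int) (acc : List (Int × Int)) (pos : Int) :
    (l.foldl (fun acc length => (acc.1 ++ [(acc.2, acc.2 + length + ov)], acc.2 + length)) (acc, pos)).1
      = acc ++ pvEmit ov l pos := by
  induction l generalizing acc pos with
  | nil => simp [pvEmit]
  | cons x xs ih => simp [pvEmit, ih]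

theorem pvEmit_append (ov : Int) (l1 l2 : List Int) (p : Int) :
    pvEmit ov (l1 ++ l2) p = pvEmit ov l1 p ++ pvEmit ov l2 (p + l1.sum) := by
  induction l1 generalizing p with
  | nil => simp [pvEmit]
  | cons x xs ih => simp [pvEmit, ih]; ring_nf

theorem pvEmit_replicate (ov v : Int) (n : Nat) (p : Int) :
    pvEmit ov (List.replicate n v) p
      = (List.range n).map (fun (j : Nat) => (p + v * (j : Int), p + v * ((j : Int) + 1) + ov)) := by
  induction n generalizing p with
  | zero => simp [pvEmit]
  | succ m ih =>
      rw [List.replicate_succ, List.range_succ_eq_map]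
      simp only [pvEmit, List.map_cons, List.map_map]
      refine List.cons_eq_cons.mpr ⟨?_, ?_⟩
      · simp only [Prod.mk.injEq]
        refine ⟨by push_cast; ring, by push_cast; ring⟩
      · rw [ih]
        apply List.map_congr_left
        intro j _
        simp only [Function.comp, Prod.mk.injEq]
        refine ⟨by push_cast; ring, by push_cast; ring⟩

theorem pvFoldA (num new_l ov : Int) (l : List Int) (acc : List (Int × Int)) :
    (l.foldl (fun result i =>
      if i < num then result ++ [((new_l + 1) * i, (new_l + 1) * (i + 1) + ov)]
      else result ++ [(new_l * i + num, new_l * (i + 1) + ov + num)]) acc)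
    = acc ++ l.map (fun i =>
        if i < num then ((new_l + 1) * i, (new_l + 1) * (i + 1) + ov)
        else (new_l * i + num, new_l * (i + 1) + ov + num)) := by
  have h : (fun (result : List (Int × Int)) i =>
      if i < num then result ++ [((new_l + 1) * i, (new_l + 1) * (i + 1) + ov)]
      else result ++ [(new_l * i + num, new_l * (i + 1) + ov + num)])
      = fun result i => result ++ [if i < num then ((new_l + 1) * i, (new_l + 1) * (i + 1) + ov)
        else (new_l * i + num, new_l * (i + 1) + ov + num)] := by
    funext result i; split_ifs <;> rfl
  rw [h, PySem.List.foldl_append_singleton_eq_map]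

theorem split_into_overlapping_regions_spec : Claim_equal_split_into_overlapping_regions := by
  intro t l ov _ hpre
  unfold Spec_split_into_overlapping_regions split_into_overlapping_regions split_into_overlapping_regions_alt
  by_cases hle : t ≤ l
  · simp [hle]
  · simp only [hle, if_false]
    unfold Pre_split_into_overlapping_regions at hpre
    simp only [Bool.or_eq_true, Bool.and_eq_true, Bool.not_eq_true', beq_eq_false_iff_ne,
      decide_eq_true_eq] at hpre
    rcases hpre with h | ⟨hne, hdiv⟩
    · exact absurd h hle
    set div := PySem.Int.floordiv (t - ov - 1) (l - ov) with hdivdef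
    set new_l := PySem.Int.floordiv (t - ov - 1) div with hnl
    set num := PySem.Int.mod (t - ov - 1) div with hnum
    rw [pvFoldA, pvFoldB, List.nil_append, List.nil_append]
    rcases lt_trichotomy div 0 with hneg | hzero | hpos
    · -- div < 0: range is empty and so is the lengths list
      have hb := PySem.Int.mod_neg_bounds (a := t - ov - 1) hneg
      have h1 : num.toNat = 0 := by omega
      have h2 : (div - num).toNat = 0 := by omega
      rw [PySem.List.pyRange_one]
      have h3 : (div - 0).toNat = 0 := by omega
      rw [h3]
      simp [h1, h2, pvEmit]
    · exact absurd hzero hdiv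
    · -- div > 0
      have hnn : 0 ≤ num := PySem.Int.mod_nonneg _ hpos
      have hlt : num < div := PySem.Int.mod_lt _ hpos
      have hd : (div - 0).toNat = num.toNat + (div - num).toNat := by omega
      rw [pvEmit_append, pvEmit_replicate, pvEmit_replicate,
        PySem.List.pyRange_one, hd, List.range_add]
      have ha : ((num.toNat : Int)) = num := by omega
      have hsum : (List.replicate num.toNat (new_l + 1)).sum = (num.toNat : Int) * (new_l + 1) := by
        simp [List.sum_replicate]
      rw [hsum, ha]
      simp only [List.map_append, List.map_map]
      congr 1
      · apply List.map_congr_left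
        intro j hj
        rw [List.mem_range] at hj
        simp only [Function.comp]
        rw [if_pos (by omega)]
        simp only [Prod.mk.injEq]
        refine ⟨by ring, by ring⟩
      · apply List.map_congr_left
        intro j _
        simp only [Function.comp]
        rw [if_neg (by push_cast; omega)]
        simp only [Prod.mk.injEq]
        refine ⟨by push_cast [ha]; ring, by push_cast [ha]; ring⟩

-- ===== VERDICT (by name: the statement is the Claim_ definition above) =====
-- (split_into_overlapping_regions_spec above proves Claim_equal_split_into_overlapping_regions)
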